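-- pv_equiv track=rewrite | github.com/HarshitBagla/fa18-hw-ref | hw3.py | reverse_block
-- ===== SOURCE A (Python) =====
-- def reverse_block(arr, n):
-- 	temp = []
-- 	i=0
-- 	while (i+n) < len(arr):
-- 		temp.append(arr[i:i+n])
-- 		i += n
-- 	temp.append(arr[i:])
-- 	for l in temp:
-- 		l.reverse()
-- 	output = []
-- 	for i in range(0, len(temp)):
-- 		for j in range(0, len(temp[i])):
-- 			output.append(temp[i][j])
-- 	return output
-- ===== SOURCE B (Python) =====
-- def reverse_block(arr, n):
--     L = len(arr)
--     out = []
--     for k in range(L):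
--         s = (k // n) * n          # start of k's block
--         e = min(s + n, L)         # end of k's block
--         out.append(arr[e - 1 - (k - s)])  # mirror k within its block
--     return out
-- ===== Notes on version B (the rewrite author's own statement) =====
-- stated objective: alternative
-- what changed: Replaces A's three phases over a list of slice-blocks (collect slices, reverse each in place, nested-loop flatten) by a direct index permutation: for each output position k it computes its block bounds arithmetically (s = (k//n)*n, e = min(s+n,len)) and reads arr[e-1-(k-s)], building no intermediate blocks and never calling reverse or slicing.
import Mathlib
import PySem

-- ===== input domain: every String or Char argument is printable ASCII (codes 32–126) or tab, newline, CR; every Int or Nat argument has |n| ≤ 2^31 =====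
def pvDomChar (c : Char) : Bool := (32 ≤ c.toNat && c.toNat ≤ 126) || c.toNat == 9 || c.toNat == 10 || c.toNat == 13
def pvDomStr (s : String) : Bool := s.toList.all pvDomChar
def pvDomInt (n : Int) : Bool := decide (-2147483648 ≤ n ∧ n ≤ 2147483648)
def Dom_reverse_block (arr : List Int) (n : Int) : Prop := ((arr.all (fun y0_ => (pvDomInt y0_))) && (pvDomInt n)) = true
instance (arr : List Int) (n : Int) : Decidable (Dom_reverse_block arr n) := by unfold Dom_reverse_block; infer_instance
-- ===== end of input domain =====

-- B computes each output element directly by an arithmetic index permutation (block bounds from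
-- k//n, mirrored index) instead of A's three phases (collect slice-blocks, reverse each, flatten);
-- objective: alternative (no blocks, no slicing, no reverse).

-- ===== PORT A =====
-- while (i+n) < len(arr): temp.append(arr[i:i+n]); i += n      then temp.append(arr[i:])
-- fuel = arr.length + 1 suffices for every input admitted by Pre_ (i advances by n ≥ 1, or arr = []);
-- on n ≤ 0 with inputs outside Pre_ the Python loop diverges.
def revblkTemp (fuel : Nat) (arr : List Int) (n i : Int) : List (List Int) :=
  match fuel with
  | 0 => []
  | f + 1 =>
    if i + n < (arr.length : Int) then
      PySem.List.slice arr (some i) (some (i + n)) :: revblkTemp f arr n (i + n)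
    else
      [PySem.List.slice arr (some i) none]

def reverse_block (arr : List Int) (n : Int) : List Int :=
  let temp := revblkTemp (arr.length + 1) arr n 0
  let temp := temp.map List.reverse                 -- for l in temp: l.reverse()
  -- for i in range(0, len(temp)): for j in range(0, len(temp[i])): output.append(temp[i][j])
  temp.foldl (fun output l => l.foldl (fun o x => o ++ [x]) output) []

-- ===== PORT B =====
-- for k in range(L): s = (k//n)*n; e = min(s+n, L); out.append(arr[e-1-(k-s)])
-- arr[...] is ported as pyGet? with a .getD 0: inside Pre_ the mirrored index is always in range
-- (proved in blockMap below), so the default is never taken on any admitted input.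
def reverse_block_alt (arr : List Int) (n : Int) : List Int :=
  (PySem.List.pyRange 0 (arr.length : Int) 1).foldl (fun out k =>
    let s := PySem.Int.floordiv k n * n
    let e := min (s + n) (arr.length : Int)
    out ++ [(PySem.List.pyGet? arr (e - 1 - (k - s))).getD 0]) []

-- ===== PRECONDITION & SPEC =====
-- Pre_ excludes exactly the inputs on which A's while loop never terminates:
-- n ≤ 0 with arr nonempty, and n < 0 with arr empty (there i+n < len(arr) holds forever).
def Pre_reverse_block (arr : List Int) (n : Int) : Prop := 1 ≤ n ∨ (n = 0 ∧ arr = [])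
instance (arr : List Int) (n : Int) : Decidable (Pre_reverse_block arr n) := by
  unfold Pre_reverse_block; infer_instance

def pvWitness_reverse_block : List Int × Int := ([1, 2, 3, 4, 5], 2)

def Spec_reverse_block (arr : List Int) (n : Int) (out : List Int) : Prop := out = reverse_block_alt arr n
instance (arr : List Int) (n : Int) (out : List Int) : Decidable (Spec_reverse_block arr n out) := by
  unfold Spec_reverse_block; infer_instance

-- ===== CLAIM (what is proved, stated in full; the proofs are below) =====
def Claim_equal_reverse_block : Prop := ∀ (arr : List Int) (n : Int), Dom_reverse_block arr n → Pre_reverse_block arr n → Spec_reverse_block arr n (reverse_block arr n)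

-- ===== LEMMAS AND PROOFS =====

lemma foldl_snoc (l out : List Int) :
    l.foldl (fun o x => o ++ [x]) out = out ++ l := by
  induction l generalizing out with
  | nil => simp
  | cons a t ih => simp [List.foldl, ih]

lemma foldl_flatten (temp : List (List Int)) (out : List Int) :
    temp.foldl (fun output l => l.foldl (fun o x => o ++ [x]) output) out
      = out ++ temp.flatten := by
  induction temp generalizing out with
  | nil => simp
  | cons a t ih => rw [List.foldl_cons, foldl_snoc, ih]; simp

lemma slice_tail_of_ge (arr : List Int) (i b : Int) (hi : 0 ≤ i)
    (hb : (arr.length : Int) ≤ b) (hib : i ≤ b) :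
    PySem.List.slice arr (some i) (some b) = PySem.List.slice arr (some i) none := by
  rw [PySem.List.slice_toNat arr hi (le_trans hi hib), PySem.List.slice_from arr hi]
  exact List.take_of_length_le (by simp [List.length_drop]; omega)

lemma slice_empty_of_ge (arr : List Int) (i : Int) (hi : (arr.length : Int) ≤ i) :
    PySem.List.slice arr (some i) none = [] := by
  rw [PySem.List.slice_from arr (le_trans (by positivity) hi)]
  exact List.drop_eq_nil_of_le (by omega)

-- the mirrored-index map over one block's range of k-values IS the reversed slice
lemma blockMap (arr : List Int) (n i : Int) (hn : 1 ≤ n) (hi : 0 ≤ i) (hd : n ∣ i)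
    (hL : i < (arr.length : Int)) :
    (PySem.List.pyRange i (min (i + n) (arr.length : Int)) 1).map
      (fun k => (PySem.List.pyGet? arr
        (min (PySem.Int.floordiv k n * n + n) (arr.length : Int) - 1
          - (k - PySem.Int.floordiv k n * n))).getD 0)
      = (PySem.List.slice arr (some i) (some (i + n))).reverse := by
  obtain ⟨q, hq⟩ := hd
  have hsq : ∀ k : Int, i ≤ k → k < i + n → PySem.Int.floordiv k n * n = i := by
    intro k h1 h2
    have : PySem.Int.floordiv k n = q := by
      rw [PySem.Int.floordiv_eq_iff_of_pos (by omega)]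
      constructor <;> nlinarith
    rw [this]; nlinarith
  rw [PySem.List.slice_toNat arr hi (by omega)]
  apply List.ext_getElem
  · simp [PySem.List.length_pyRange_one]
    omega
  · intro j hj hj'
    have hjm : (i : Int) + j < min (i + n) (arr.length : Int) := by
      rw [List.length_map, PySem.List.length_pyRange_one] at hj
      omega
    rw [List.getElem_map, PySem.List.getElem_pyRange_one]
    rw [hsq (i + j) (by omega) (by omega)]
    have hlen : ((arr.drop i.toNat).take ((i + n).toNat - i.toNat)).length
        = (min (i + n) (arr.length : Int) - i).toNat := by
      simp [List.length_take, List.length_drop]; omega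
    rw [List.getElem_reverse]
    rw [List.getElem_take, List.getElem_drop]
    have hidx : min (i + n) (arr.length : Int) - 1 - ((i + j : Int) - i)
        = ((i.toNat + (((arr.drop i.toNat).take ((i + n).toNat - i.toNat)).length - 1 - j) : Nat) : Int) := by
      rw [hlen]; push_cast; omega
    rw [hidx, PySem.List.pyGet?_natCast]
    rw [List.getElem?_eq_getElem (by rw [hlen] at *; omega)]
    rfl

-- B's mirrored-index map over the remaining range [i, len) equals the flattened reversed blocks from i
lemma keyB (fuel : Nat) : ∀ (arr : List Int) (n i : Int),
    1 ≤ n → 0 ≤ i → n ∣ i → (arr.length : Int) - i < fuel →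
    (PySem.List.pyRange i (arr.length : Int) 1).map (fun k =>
        (PySem.List.pyGet? arr
          (min (PySem.Int.floordiv k n * n + n) (arr.length : Int) - 1
            - (k - PySem.Int.floordiv k n * n))).getD 0)
      = ((revblkTemp fuel arr n i).map List.reverse).flatten := by
  induction fuel with
  | zero =>
    intro arr n i _ hi hf h
    rw [PySem.List.pyRange_one_eq_nil (by omega)]
    simp [revblkTemp]
  | succ f ih =>
    intro arr n i hn hi hd hf
    by_cases hlt : i < (arr.length : Int)
    · have he1 : i ≤ min (i + n) (arr.length : Int) := by omega
      have he2 : min (i + n) (arr.length : Int) ≤ (arr.length : Int) := by omega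
      rw [PySem.List.pyRange_one_append i (min (i + n) (arr.length : Int)) _ he1 he2,
        List.map_append, blockMap arr n i hn hi hd hlt]
      by_cases hin : i + n < (arr.length : Int)
      · have hmin : min (i + n) (arr.length : Int) = i + n := by omega
        rw [hmin, ih arr n (i + n) hn (by omega) (by exact dvd_add hd (dvd_refl n)) (by omega)]
        rw [revblkTemp, if_pos hin]
        simp
      · have hmin : min (i + n) (arr.length : Int) = (arr.length : Int) := by omega
        rw [hmin, PySem.List.pyRange_one_eq_nil le_rfl, List.map_nil,
          revblkTemp, if_neg hin,
          slice_tail_of_ge arr i (i + n) hi (by omega) (by omega)]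
        simp
    · rw [PySem.List.pyRange_one_eq_nil (by omega),
        revblkTemp, if_neg (by omega), slice_empty_of_ge arr i (by omega)]
      simp

-- ===== VERDICT (by name: the statement is the Claim_ definition above) =====
theorem reverse_block_spec : Claim_equal_reverse_block := by
  intro arr n _ hpre
  unfold Spec_reverse_block reverse_block reverse_block_alt
  rw [foldl_flatten, PySem.List.foldl_append_singleton_eq_map]
  rcases hpre with hn | ⟨hn, harr⟩
  · rw [keyB (arr.length + 1) arr n 0 hn le_rfl (dvd_zero n) (by omega)]
  · subst hn harr
    simp [revblkTemp, PySem.List.pyRange_one_eq_nil]
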